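-- pv_equiv track=rewrite | github.com/jixunmoe/LunarMagicSign | Outdated/py3-signer/calc.py | calc
-- ===== SOURCE A (Python) =====
-- def odd   (i): return 0xFF & (i << 0x2 | i >> 0x6) ^ 0x29
--
-- def even  (i): return 0xFF & (i << 0x5 | i >> 0x3) ^ 0x26
--
-- def calc (hFile):
-- 	isOdd = False
-- 	result = 0
-- 	for i in range(0, len(hFile)):
-- 		if (isOdd):
-- 			result += odd (hFile[i])
-- 		else:
-- 			result -= even (hFile[i])
-- 		isOdd = not isOdd
--
-- 	return result
-- ===== SOURCE B (Python) =====
-- def odd   (i): return 0xFF & (i << 0x2 | i >> 0x6) ^ 0x29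
--
-- def even  (i): return 0xFF & (i << 0x5 | i >> 0x3) ^ 0x26
--
-- def calc (hFile):
-- 	# partition by index parity, then sum each class in one sweep
-- 	plus  = sum(odd(b)  for b in hFile[1::2])
-- 	minus = sum(even(b) for b in hFile[0::2])
-- 	return plus - minus
-- ===== Notes on version B (the rewrite author's own statement) =====
-- stated objective: simpler
-- what changed: Replaced the single flag-driven index loop with two partitioned slice sweeps: sum odd() over hFile[1::2] minus sum even() over hFile[::2], removing the isOdd toggle and the branch entirely.
import Mathlib
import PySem

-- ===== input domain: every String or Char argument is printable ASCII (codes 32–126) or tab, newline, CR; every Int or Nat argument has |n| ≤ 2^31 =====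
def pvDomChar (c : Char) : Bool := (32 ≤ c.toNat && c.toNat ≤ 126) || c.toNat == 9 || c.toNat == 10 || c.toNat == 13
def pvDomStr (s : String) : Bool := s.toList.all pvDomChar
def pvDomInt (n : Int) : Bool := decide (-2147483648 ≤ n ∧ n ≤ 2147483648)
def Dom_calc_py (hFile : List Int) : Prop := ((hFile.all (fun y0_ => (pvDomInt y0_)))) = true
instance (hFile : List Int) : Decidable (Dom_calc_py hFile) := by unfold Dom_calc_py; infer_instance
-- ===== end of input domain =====

-- B replaces A's flag-driven interleaved loop with two partitioned slice sweeps (objective: simpler); same return value on all inputs.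

-- ===== PORT A =====
-- def odd(i): return 0xFF & (i << 0x2 | i >> 0x6) ^ 0x29   (& binds tighter than ^)
def odd_py (i : Int) : Int :=
  PySem.Int.bxor (PySem.Int.band 0xFF (PySem.Int.bor (i <<< (2:Nat)) (i >>> (6:Nat)))) 0x29

-- def even(i): return 0xFF & (i << 0x5 | i >> 0x3) ^ 0x26
def even_py (i : Int) : Int :=
  PySem.Int.bxor (PySem.Int.band 0xFF (PySem.Int.bor (i <<< (5:Nat)) (i >>> (3:Nat)))) 0x26

-- for i in range(0, len(hFile)): toggle isOdd, add odd / subtract even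
def calc_py (hFile : List Int) : Int :=
  ((PySem.List.pyRange 0 (PySem.List.len hFile) 1).foldl
    (fun (st : Bool × Int) i =>
      (!st.1, if st.1 then st.2 + odd_py (PySem.List.pyGetD hFile i 0)
              else st.2 - even_py (PySem.List.pyGetD hFile i 0)))
    (false, 0)).2

-- ===== PORT B =====
-- Source B's odd/even are byte-identical to A's helpers; the port shares odd_py/even_py.
-- plus = sum over hFile[1::2], minus = sum over hFile[::2]
def calc_py_alt (hFile : List Int) : Int :=
  (((PySem.List.slice? hFile (some 1) none 2).getD []).map odd_py).sum
  - (((PySem.List.slice? hFile none none 2).getD []).map even_py).sum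

-- ===== PRECONDITION & SPEC =====
def Spec_calc_py (hFile : List Int) (out : Int) : Prop := out = calc_py_alt hFile
instance (hFile : List Int) (out : Int) : Decidable (Spec_calc_py hFile out) := by unfold Spec_calc_py; infer_instance

-- ===== CLAIM (what is proved, stated in full; the proofs are below) =====
def Claim_equal_calc_py : Prop := ∀ (hFile : List Int), Dom_calc_py hFile → Spec_calc_py hFile (calc_py hFile)

-- ===== LEMMAS AND PROOFS =====

-- elements at even / odd positions (the lists hFile[::2] and hFile[1::2] denote)
mutual
def pvEvens : List Int → List Int
  | [] => []
  | x :: xs => x :: pvOdds xs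
def pvOdds : List Int → List Int
  | [] => []
  | _ :: xs => pvEvens xs
end

-- A's loop body on the (isOdd, result) state
def pvStep (acc : Bool × Int) (v : Int) : Bool × Int :=
  (!acc.1, if acc.1 then acc.2 + odd_py v else acc.2 - even_py v)

-- what A's loop adds to result from flag b onward
def pvS : Bool → List Int → Int
  | _, [] => 0
  | b, x :: xs => (if b then odd_py x else -even_py x) + pvS (!b) xs

lemma pv_foldS (xs : List Int) : ∀ (b : Bool) (r : Int),
    (xs.foldl pvStep (b, r)).2 = r + pvS b xs := by
  induction xs with
  | nil => intro b r; simp [pvS]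
  | cons x xs ih =>
    intro b r
    simp only [List.foldl_cons, pvStep, pvS, ih]
    cases b <;> simp <;> ring

lemma pv_S_sum (xs : List Int) :
    pvS false xs = ((pvOdds xs).map odd_py).sum - ((pvEvens xs).map even_py).sum ∧
    pvS true xs = ((pvEvens xs).map odd_py).sum - ((pvOdds xs).map even_py).sum := by
  induction xs with
  | nil => simp [pvS, pvEvens, pvOdds]
  | cons x xs ih =>
    constructor
    · simp only [pvS, pvEvens, pvOdds, List.map_cons, List.sum_cons, Bool.not_false,
        Bool.false_eq_true, if_false, ih.2]
      ring
    · simp only [pvS, pvEvens, pvOdds, List.map_cons, List.sum_cons, Bool.not_true,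
        if_true, ih.1]
      ring

lemma pv_fm_both (xs : List Int) :
    List.filterMap (fun k => xs[2*k]?) (List.range ((xs.length+1)/2)) = pvEvens xs ∧
    List.filterMap (fun k => xs[2*k+1]?) (List.range (xs.length/2)) = pvOdds xs := by
  induction xs with
  | nil => simp [pvEvens, pvOdds]
  | cons x xs ih =>
    constructor
    · have hc : ((x :: xs).length + 1) / 2 = xs.length / 2 + 1 := by
        simp only [List.length_cons]; omega
      rw [hc, List.range_succ_eq_map, List.filterMap_cons, List.filterMap_map]
      simp only [Function.comp, Nat.mul_zero, List.getElem?_cons_zero, pvEvens]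
      congr 1
      have h : ∀ k, (x :: xs)[2*(k+1)]? = xs[2*k+1]? := by
        intro k
        have h2 : 2*(k+1) = (2*k+1)+1 := by omega
        rw [h2, List.getElem?_cons_succ]
      simp only [Nat.succ_eq_add_one, h]
      exact ih.2
    · have hc : (x :: xs).length / 2 = (xs.length + 1) / 2 := by
        simp [List.length_cons]
      rw [hc]
      have h : ∀ k, (x :: xs)[2*k+1]? = xs[2*k]? := fun k => List.getElem?_cons_succ
      simp only [h, pvOdds]
      exact ih.1

lemma pv_slice2_evens (xs : List Int) :
    (PySem.List.slice? xs none none 2).getD [] = pvEvens xs := by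
  simp only [PySem.List.slice?, PySem.List.sliceIndices]
  norm_num
  have hc : (if 0 < xs.length then (((xs.length : Int) + 2 - 1) / 2).toNat else 0)
      = (xs.length + 1)/2 := by
    split <;> omega
  rw [hc]
  have h2 : ∀ k : ℕ, ((2 * (k:Int)).toNat) = 2*k := fun k => by omega
  simp only [h2]
  exact (pv_fm_both xs).1

lemma pv_slice2_odds (xs : List Int) :
    (PySem.List.slice? xs (some 1) none 2).getD [] = pvOdds xs := by
  cases xs with
  | nil => simp [PySem.List.slice?, PySem.List.sliceIndices, pvOdds]
  | cons x t =>
    simp only [PySem.List.slice?, PySem.List.sliceIndices]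
    norm_num
    have hc : (if 0 < t.length then (((t.length : Int) + 2 - 1) / 2).toNat else 0)
        = (x :: t).length / 2 := by
      simp only [List.length_cons]; split <;> omega
    rw [hc]
    have h2 : ∀ k : ℕ, ((1 + 2 * (k:Int)).toNat) = 2*k+1 := fun k => by omega
    simp only [h2]
    exact (pv_fm_both (x :: t)).2

-- ===== VERDICT (by name: the statement is the Claim_ definition above) =====
theorem calc_py_spec : Claim_equal_calc_py := by
  intro hFile _
  unfold Spec_calc_py calc_py calc_py_alt
  rw [show (fun (st : Bool × Int) i =>
        (!st.1, if st.1 then st.2 + odd_py (PySem.List.pyGetD hFile i 0)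
                else st.2 - even_py (PySem.List.pyGetD hFile i 0)))
      = (fun acc j => pvStep acc (PySem.List.pyGetD hFile j 0)) from rfl]
  rw [PySem.List.foldl_pyRange_pyGetD (xs := hFile) (f := pvStep) (d := 0) (init := ((false : Bool), (0 : Int))) (a := 0) (le_refl 0)]
  simp only [Int.toNat_zero, List.drop_zero]
  rw [pv_foldS hFile false 0, zero_add, (pv_S_sum hFile).1,
      pv_slice2_evens, pv_slice2_odds]
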